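-- pv_equiv track=rewrite | github.com/s0cx/py-scripts | BJ.py | hand_total_and_soft
-- ===== SOURCE A (Python) =====
-- from typing import List, Tuple
--
-- def hand_total_and_soft(cards: List[str]) -> Tuple[int,bool,int]:
--     total, aces = 0, 0
--     for c in cards:
--         if c=="A": total+=11; aces+=1
--         elif c=="T": total+=10
--         else: total+=int(c)
--     soft_aces = aces
--     while total>21 and soft_aces>0:
--         total-=10
--         soft_aces-=1
--     return total,(soft_aces>0),soft_aces
-- ===== SOURCE B (Python) =====
-- from typing import List, Tuple
--
-- def hand_total_and_soft(cards: List[str]) -> Tuple[int, bool, int]: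
--     aces = cards.count("A")
--     total = sum(11 if c == "A" else 10 if c == "T" else int(c) for c in cards)
--     demote = 0 if total <= 21 else min(aces, (total - 21 + 9) // 10)
--     total -= 10 * demote
--     soft = aces - demote
--     return total, soft > 0, soft
-- ===== Notes on version B (the rewrite author's own statement) =====
-- stated objective: simpler
-- what changed: The one-at-a-time while loop that demotes aces from 11 to 1 is replaced by a closed-form ceiling-division formula computing how many aces to demote in O(1).
import Mathlib
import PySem

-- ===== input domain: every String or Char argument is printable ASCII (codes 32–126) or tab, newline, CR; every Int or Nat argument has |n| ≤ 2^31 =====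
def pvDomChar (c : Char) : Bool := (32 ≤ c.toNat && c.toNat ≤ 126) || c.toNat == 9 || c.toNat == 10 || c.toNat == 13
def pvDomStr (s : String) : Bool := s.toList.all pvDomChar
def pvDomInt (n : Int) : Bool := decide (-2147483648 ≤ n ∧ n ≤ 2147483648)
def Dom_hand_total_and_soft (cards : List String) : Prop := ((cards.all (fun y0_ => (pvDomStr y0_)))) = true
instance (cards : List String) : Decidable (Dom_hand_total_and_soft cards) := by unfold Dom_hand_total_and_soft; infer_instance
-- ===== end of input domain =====

-- B replaces A's one-by-one ace-demotion while loop with a closed-form min/ceiling-division formula (objective: simpler).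

-- ===== PORT A =====
-- the while loop: soft_aces decreases by one each iteration
def pvDeflate (total soft : Int) : Int × Int :=
  if total > 21 ∧ soft > 0 then pvDeflate (total - 10) (soft - 1) else (total, soft)
termination_by soft.toNat
decreasing_by omega

def hand_total_and_soft (cards : List String) : Int × Bool × Int :=
  let st := cards.foldl (fun (s : Int × Int) c =>
      if c = "A" then (s.1 + 11, s.2 + 1)
      else if c = "T" then (s.1 + 10, s.2)
      else (s.1 + (PySem.Int.ofStr? c).getD 0, s.2)) (0, 0)  -- int(c); none (ValueError) excluded by Pre_
  let ts := pvDeflate st.1 st.2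
  (ts.1, ts.2 > 0, ts.2)

-- ===== PORT B =====
def hand_total_and_soft_alt (cards : List String) : Int × Bool × Int :=
  let aces : Int := PySem.List.count cards "A"
  let total : Int := (cards.map (fun c =>
      if c = "A" then (11 : Int) else if c = "T" then 10
      else (PySem.Int.ofStr? c).getD 0)).sum
  let demote : Int := if total ≤ 21 then 0 else min aces (PySem.Int.floordiv (total - 21 + 9) 10)
  let t := total - 10 * demote
  let soft := aces - demote
  (t, soft > 0, soft)

-- ===== PRECONDITION & SPEC =====
-- Pre_ excludes exactly the cards on which Python's int(c) raises ValueError (A raises there too).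
def Pre_hand_total_and_soft (cards : List String) : Prop :=
  ∀ c ∈ cards, c = "A" ∨ c = "T" ∨ (PySem.Int.ofStr? c).isSome
instance (cards : List String) : Decidable (Pre_hand_total_and_soft cards) := by unfold Pre_hand_total_and_soft; infer_instance
def pvWitness_hand_total_and_soft : List String := ["A", "T", "7", "A"]
def Spec_hand_total_and_soft (cards : List String) (out : Int × Bool × Int) : Prop := out = hand_total_and_soft_alt cards
instance (cards : List String) (out : Int × Bool × Int) : Decidable (Spec_hand_total_and_soft cards out) := by unfold Spec_hand_total_and_soft; infer_instance

-- ===== CLAIM (what is proved, stated in full; the proofs are below) =====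
def Claim_equal_hand_total_and_soft : Prop := ∀ (cards : List String), Dom_hand_total_and_soft cards → Pre_hand_total_and_soft cards → Spec_hand_total_and_soft cards (hand_total_and_soft cards)

-- ===== LEMMAS AND PROOFS =====

-- the fold of A computes (B's total, B's ace count), starting from any accumulator
theorem pv_fold_eq (cards : List String) (t a : Int) :
    cards.foldl (fun (s : Int × Int) c =>
      if c = "A" then (s.1 + 11, s.2 + 1)
      else if c = "T" then (s.1 + 10, s.2)
      else (s.1 + (PySem.Int.ofStr? c).getD 0, s.2)) (t, a)
    = (t + (cards.map (fun c =>
        if c = "A" then (11 : Int) else if c = "T" then 10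
        else (PySem.Int.ofStr? c).getD 0)).sum,
       a + PySem.List.count cards "A") := by
  induction cards generalizing t a with
  | nil => simp [PySem.List.count]
  | cons c cs ih =>
    by_cases hA : c = "A"
    · simp [hA, ih, PySem.List.count]; constructor <;> ring
    · by_cases hT : c = "T"
      · simp [hT, ih, PySem.List.count]; ring
      · simp [hA, hT, ih, PySem.List.count]; ring

-- the while loop equals the closed form, for a nonnegative ace count
theorem pv_deflate_eq (total soft : Int) (h : 0 ≤ soft) :
    pvDeflate total soft =
      (total - 10 * (if total ≤ 21 then 0 else min soft (PySem.Int.floordiv (total - 21 + 9) 10)),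
       soft - (if total ≤ 21 then 0 else min soft (PySem.Int.floordiv (total - 21 + 9) 10))) := by
  generalize hn : soft.toNat = n
  induction n generalizing total soft with
  | zero =>
    have hs : soft = 0 := by omega
    subst hs
    rw [pvDeflate]
    have h1 : ¬ (total > 21 ∧ (0:Int) > 0) := by omega
    rw [if_neg h1]
    by_cases ht : total ≤ 21
    · simp [ht]
    · have hd : (0:Int) < PySem.Int.floordiv (total - 21 + 9) 10 := by
        rw [PySem.Int.floordiv_eq_ediv_of_pos (by omega)]; omega
      simp [ht]; omega
  | succ n ih =>
    rw [pvDeflate]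
    by_cases hc : total > 21 ∧ soft > 0
    · rw [if_pos hc]
      rw [ih (total - 10) (soft - 1) (by omega) (by omega)]
      rw [PySem.Int.floordiv_eq_ediv_of_pos (show (0:Int) < 10 by omega),
          PySem.Int.floordiv_eq_ediv_of_pos (show (0:Int) < 10 by omega)]
      by_cases ht : total - 10 ≤ 21
      · have : ¬ total ≤ 21 := by omega
        simp only [if_pos ht, if_neg this]
        have : (total - 21 + 9) / 10 = 1 := by omega
        rw [this]
        have : min soft 1 = 1 := by omega
        rw [this]
        simp only [Prod.mk.injEq]; omega
      · have h2 : ¬ total ≤ 21 := by omega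
        simp only [if_neg ht, if_neg h2]
        have he : (total - 21 + 9) / 10 = (total - 10 - 21 + 9) / 10 + 1 := by omega
        rw [he]
        have hm : min soft ((total - 10 - 21 + 9) / 10 + 1)
            = min (soft - 1) ((total - 10 - 21 + 9) / 10) + 1 := by
          have : (0:Int) ≤ (total - 10 - 21 + 9) / 10 := by
            apply Int.ediv_nonneg <;> omega
          omega
        rw [hm]
        simp only [Prod.mk.injEq]; omega
    · rw [if_neg hc]
      by_cases ht : total ≤ 21
      · simp [ht]
      · have hs0 : soft = 0 := by omega
        subst hs0
        have hd : (0:Int) < PySem.Int.floordiv (total - 21 + 9) 10 := by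
          rw [PySem.Int.floordiv_eq_ediv_of_pos (by omega)]; omega
        simp [ht]; omega

theorem pv_count_nonneg (cards : List String) : (0:Int) ≤ PySem.List.count cards "A" :=
  Int.natCast_nonneg _

-- ===== VERDICT (by name: the statement is the Claim_ definition above) =====
theorem hand_total_and_soft_spec : Claim_equal_hand_total_and_soft := by
  intro cards _ _
  unfold Spec_hand_total_and_soft hand_total_and_soft hand_total_and_soft_alt
  dsimp only
  rw [pv_fold_eq]
  dsimp only
  rw [pv_deflate_eq _ _ (by have := pv_count_nonneg cards; omega)]
  simp
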